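-- pv_equiv track=rewrite | github.com/Pol-V/anagrams | anagrams/anagram.py | make_anagrams
-- ===== SOURCE A (Python) =====
-- def make_anagrams(text_origin):
--     if type(text_origin) != str:
--         raise TypeError('Please use just strings')
--     try:
--         if text_origin != ' ':
--             text_reversed = []
--             for words in text_origin.split():
--                 word = list(words)
--                 changing_index = 0
--                 word_mirror = list(filter(lambda x: x.isalpha(), word[::-1]))
--                 for index_of_symbol in range(len(word)):
--                     if word[index_of_symbol].isalpha():
--                         word[index_of_symbol] = word_mirror[changing_index]
--                         changing_index += 1
--                 text_reversed.append(''.join(word))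
--             return ' '.join(text_reversed)
--         else:
--             return text_origin
--     except TypeError:
--         raise TypeError('Please use just strings')
-- ===== SOURCE B (Python) =====
-- def make_anagrams(text_origin):
--     if type(text_origin) != str:
--         raise TypeError('Please use just strings')
--     if text_origin == ' ':
--         return text_origin
--     result = []
--     for w in text_origin.split():
--         chars = list(w)
--         left, right = 0, len(chars) - 1
--         while left < right:
--             if not chars[left].isalpha():
--                 left += 1
--             elif not chars[right].isalpha():
--                 right -= 1
--             else:
--                 chars[left], chars[right] = chars[right], chars[left]
--                 left += 1
--                 right -= 1
--         result.append(''.join(chars))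
--     return ' '.join(result)
-- ===== Notes on version B (the rewrite author's own statement) =====
-- stated objective: alternative
-- what changed: A builds a reversed list of each word's letters and rewrites the alphabetic positions left-to-right with a running index; B instead swaps alphabetic characters in place with two pointers moving inward from both ends, never materialising a mirror list.
import Mathlib
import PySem

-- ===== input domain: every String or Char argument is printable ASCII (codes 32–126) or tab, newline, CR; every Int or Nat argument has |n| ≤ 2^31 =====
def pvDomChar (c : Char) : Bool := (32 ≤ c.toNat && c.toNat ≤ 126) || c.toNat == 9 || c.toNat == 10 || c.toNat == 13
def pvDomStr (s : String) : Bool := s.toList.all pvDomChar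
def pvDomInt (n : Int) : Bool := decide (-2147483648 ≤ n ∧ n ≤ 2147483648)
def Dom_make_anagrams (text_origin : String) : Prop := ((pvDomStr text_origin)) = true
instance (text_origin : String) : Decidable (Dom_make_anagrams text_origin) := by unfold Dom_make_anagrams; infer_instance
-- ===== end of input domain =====

-- B replaces A's mirror-list + sequential rewrite of alphabetic positions by an in-place
-- two-pointer swap of alphabetic characters (objective: alternative algorithm, same cost).

-- ===== PORT A =====
-- 'word_mirror[changing_index]': Python would raise IndexError past the end; that branch is
-- unreachable (the mirror holds exactly as many letters as the word), the .getD default stands in.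
def make_anagrams (text_origin : String) : String :=
  if text_origin ≠ " " then
    let text_reversed := (PySem.Str.split₀ text_origin).foldl (fun acc words =>
      let word := words.toList
      let word_mirror :=
        ((PySem.List.slice? word none none (-1)).getD []).filter PySem.Chars.isalpha
      let final := (PySem.List.pyRange 0 (word.length : Int)).foldl
        (fun (st : List Char × Nat) index_of_symbol =>
          match PySem.List.pyGet? st.1 index_of_symbol with
          | some c =>
              if PySem.Chars.isalpha c then
                (st.1.set index_of_symbol.toNat ((PySem.List.pyGet? word_mirror (st.2 : Int)).getD c),
                 st.2 + 1)
              else st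
          | none => st)  -- unreachable: index_of_symbol ranges over the word's indices
        (word, 0)
      acc ++ [String.ofList final.1]) []
    PySem.Str.join " " text_reversed
  else text_origin

-- ===== PORT B =====
def pvTwoPointer (chars : List Char) (left right : Nat) : List Char :=
  if _h : left < right then
    let cl := chars.getD left ' '   -- in-range index accesses (0 ≤ left < right ≤ len-1)
    let cr := chars.getD right ' '
    if ¬ (PySem.Chars.isalpha cl) then pvTwoPointer chars (left + 1) right
    else if ¬ (PySem.Chars.isalpha cr) then pvTwoPointer chars left (right - 1)
    else pvTwoPointer ((chars.set left cr).set right cl) (left + 1) (right - 1)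
  else chars
termination_by right - left
decreasing_by all_goals omega

def make_anagrams_alt (text_origin : String) : String :=
  if text_origin == " " then text_origin
  else
    let result := (PySem.Str.split₀ text_origin).foldl (fun acc w =>
      let chars := w.toList
      acc ++ [String.ofList (pvTwoPointer chars 0 (chars.length - 1))]) []
    PySem.Str.join " " result

-- ===== PRECONDITION & SPEC =====
def Spec_make_anagrams (text_origin : String) (out : String) : Prop := out = make_anagrams_alt text_origin
instance (text_origin : String) (out : String) : Decidable (Spec_make_anagrams text_origin out) := by unfold Spec_make_anagrams; infer_instance

-- ===== CLAIM (what is proved, stated in full; the proofs are below) =====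
def Claim_equal_make_anagrams : Prop := ∀ (text_origin : String), Dom_make_anagrams text_origin → Spec_make_anagrams text_origin (make_anagrams text_origin)

-- ===== LEMMAS AND PROOFS =====

theorem pvDropTail {α : Type} (r : List α) (n : Nat) : r.tail.drop n = r.drop (n + 1) := by
  cases r <;> simp

theorem pvTakeSucc {α : Type} (l : List α) (n : Nat) (h : n < l.length) :
    l.take (n + 1) = l.take n ++ [l[n]] := by
  rw [← List.take_concat_get h, List.concat_eq_append]

theorem pvTakeDropSucc {α : Type} (xs : List α) (i n j : Nat) (hj : i + n = j)
    (h : j < xs.length) :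
    (xs.drop i).take (n + 1) = (xs.drop i).take n ++ [xs[j]] := by
  subst hj
  rw [pvTakeSucc _ n (by rw [List.length_drop]; omega)]
  simp [List.getElem_drop]

-- Reference function: rewrite the alphabetic positions of the word with the supplied list, in order.
def pvFill : List Char → List Char → List Char
  | [], _ => []
  | c :: cs, r =>
      if PySem.Chars.isalpha c then r.headD c :: pvFill cs r.tail
      else c :: pvFill cs r

-- Reference result for one word: letters reversed in place, symbols fixed.
def pvSpec (cs : List Char) : List Char :=
  pvFill cs ((cs.filter PySem.Chars.isalpha).reverse)

theorem pvFill_notalpha {c : Char} (h : PySem.Chars.isalpha c = false) (cs r : List Char) :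
    pvFill (c :: cs) r = c :: pvFill cs r := by simp [pvFill, h]

theorem pvFill_alpha {c : Char} (h : PySem.Chars.isalpha c = true) (cs r : List Char) :
    pvFill (c :: cs) r = r.headD c :: pvFill cs r.tail := by simp [pvFill, h]

theorem pvFill_append (xs ys r : List Char) :
    pvFill (xs ++ ys) r = pvFill xs r ++ pvFill ys (r.drop (xs.countP PySem.Chars.isalpha)) := by
  induction xs generalizing r with
  | nil => simp [pvFill]
  | cons c cs ih =>
    by_cases h : PySem.Chars.isalpha c
    · rw [List.cons_append, pvFill_alpha h, pvFill_alpha h, ih, pvDropTail]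
      simp [h]
    · have h' : PySem.Chars.isalpha c = false := by simpa using h
      rw [List.cons_append, pvFill_notalpha h', pvFill_notalpha h', ih]
      simp [h']

theorem pvFill_extra (m R E : List Char) (h : m.countP PySem.Chars.isalpha ≤ R.length) :
    pvFill m (R ++ E) = pvFill m R := by
  induction m generalizing R with
  | nil => simp [pvFill]
  | cons c cs ih =>
    by_cases hc : PySem.Chars.isalpha c
    · have hR : R ≠ [] := by
        intro hnil; subst hnil
        simp [hc] at h
      obtain ⟨r0, R', rfl⟩ := List.exists_cons_of_ne_nil hR
      simp only [List.countP_cons, hc, if_pos, List.length_cons] at h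
      rw [List.cons_append, pvFill_alpha hc, pvFill_alpha hc]
      simp only [List.headD_cons, List.tail_cons]
      rw [ih R' (by omega)]
    · have h' : PySem.Chars.isalpha c = false := by simpa using hc
      simp only [List.countP_cons, h'] at h
      rw [pvFill_notalpha h', pvFill_notalpha h']
      rw [ih R (by simpa using h)]

theorem countP_filter_eq (m : List Char) :
    (m.filter PySem.Chars.isalpha).length = m.countP PySem.Chars.isalpha :=
  (List.countP_eq_length_filter).symm

theorem pvSpec_cons_notalpha {c : Char} (h : PySem.Chars.isalpha c = false) (m : List Char) :
    pvSpec (c :: m) = c :: pvSpec m := by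
  simp [pvSpec, pvFill_notalpha h, h]

theorem pvSpec_append_notalpha {c : Char} (h : PySem.Chars.isalpha c = false) (m : List Char) :
    pvSpec (m ++ [c]) = pvSpec m ++ [c] := by
  simp only [pvSpec, List.filter_append, List.filter_cons, h]
  simp [pvFill_append, pvFill, h]

theorem pvSpec_swap {a b : Char} (ha : PySem.Chars.isalpha a = true)
    (hb : PySem.Chars.isalpha b = true) (m : List Char) :
    pvSpec (a :: m ++ [b]) = b :: pvSpec m ++ [a] := by
  have hfil : List.filter PySem.Chars.isalpha (a :: m ++ [b])
      = a :: (List.filter PySem.Chars.isalpha m ++ [b]) := by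
    simp [List.filter_append, ha, hb]
  unfold pvSpec
  rw [hfil]
  rw [show (a :: (List.filter PySem.Chars.isalpha m ++ [b])).reverse
        = b :: ((List.filter PySem.Chars.isalpha m).reverse ++ [a]) from by simp]
  rw [show (a :: m ++ [b] : List Char) = a :: (m ++ [b]) from rfl, pvFill_alpha ha]
  simp only [List.headD_cons, List.tail_cons]
  rw [pvFill_append]
  rw [pvFill_extra m _ [a] (by rw [← countP_filter_eq]; simp)]
  rw [show m.countP PySem.Chars.isalpha
        = (List.filter PySem.Chars.isalpha m).reverse.length from by
        rw [List.length_reverse, countP_filter_eq]]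
  rw [List.drop_left]
  simp [pvFill, hb]

theorem pvSpec_singleton (c : Char) : pvSpec [c] = [c] := by
  by_cases h : PySem.Chars.isalpha c <;> simp [pvSpec, pvFill, h]

-- ===== B-side characterisation: the two-pointer loop computes pvSpec on the active segment =====
theorem pvTwoPointer_spec (chars : List Char) (l r : Nat)
    (hl : l ≤ r + 1) (hr : r < chars.length) :
    pvTwoPointer chars l r
      = chars.take l ++ pvSpec ((chars.drop l).take (r + 1 - l)) ++ chars.drop (r + 1) := by
  by_cases hlr : l < r
  · have hlen : l < chars.length := by omega
    have hcl : chars.getD l ' ' = chars[l] := by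
      simp [List.getD_eq_getElem?_getD, List.getElem?_eq_getElem hlen]
    have hcr : chars.getD r ' ' = chars[r] := by
      simp [List.getD_eq_getElem?_getD, List.getElem?_eq_getElem hr]
    rw [pvTwoPointer]
    simp only [dif_pos hlr, hcl, hcr]
    by_cases h1 : PySem.Chars.isalpha chars[l]
    · by_cases h2 : PySem.Chars.isalpha chars[r]
      · -- swap case
        simp only [h1, h2, not_true_eq_false, if_false]
        set chars' := (chars.set l chars[r]).set r chars[l] with hch
        have ih := pvTwoPointer_spec chars' (l+1) (r-1) (by omega) (by simp [hch]; try omega)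
        rw [ih]
        have htake : chars'.take (l+1) = chars.take l ++ [chars[r]] := by
          rw [hch, List.take_set, List.take_set]
          rw [List.set_eq_of_length_le (by simp [List.length_take]; try omega)]
          rw [pvTakeSucc _ _ hlen]
          rw [List.set_append_right _ _ (by simp [List.length_take]; try omega)]
          simp [List.length_take, Nat.min_eq_left (le_of_lt hlen)]
        have hdropr : chars'.drop ((r-1)+1) = chars[l] :: chars.drop (r+1) := by
          have hre : (r-1)+1 = r := by omega
          rw [hre, hch]
          rw [List.drop_set, if_neg (by omega)]
          rw [show r - r = 0 from by omega]
          rw [List.drop_set, if_pos (by omega)]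
          rw [List.drop_eq_getElem_cons hr, List.set_cons_zero]
        have hmid : (chars'.drop (l+1)).take ((r-1) + 1 - (l+1))
            = (chars.drop (l+1)).take (r - 1 - l) := by
          rw [hch]
          rw [List.drop_set, if_neg (by omega)]
          rw [List.drop_set, if_pos (by omega)]
          rw [List.take_set, List.set_eq_of_length_le (by simp [List.length_take]; try omega)]
          congr 1
          omega
        rw [htake, hdropr, hmid]
        have hseg : (chars.drop l).take (r + 1 - l)
            = chars[l] :: ((chars.drop (l+1)).take (r - 1 - l)) ++ [chars[r]] := by
          rw [List.drop_eq_getElem_cons hlen]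
          rw [show r + 1 - l = (r - 1 - l) + 1 + 1 from by omega]
          simp only [List.take_succ_cons]
          congr 1
          rw [pvTakeDropSucc chars (l+1) (r-1-l) r (by omega) hr]
          rfl
        rw [hseg, pvSpec_swap h1 h2]
        simp
      · -- right char not alpha
        simp only [h2, h1, not_true_eq_false, if_false]
        have ih := pvTwoPointer_spec chars l (r-1) (by omega) (by omega)
        rw [ih]
        rw [show (r-1)+1 = r from by omega]
        have hseg : (chars.drop l).take (r + 1 - l)
            = (chars.drop l).take (r - l) ++ [chars[r]] := by
          rw [show r + 1 - l = (r - l) + 1 from by omega]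
          rw [pvTakeDropSucc chars l (r - l) r (by omega) hr]
        rw [hseg]
        rw [pvSpec_append_notalpha (by simpa using h2)]
        rw [List.drop_eq_getElem_cons hr]
        rw [show r - l = r - 1 + 1 - l from by omega]
        simp
    · -- left char not alpha
      have h1' : PySem.Chars.isalpha chars[l] = false := by simpa using h1
      rw [if_pos (by simp [h1'])]
      have ih := pvTwoPointer_spec chars (l+1) r (by omega) (by omega)
      rw [ih]
      have hseg : (chars.drop l).take (r + 1 - l)
          = chars[l] :: ((chars.drop (l+1)).take (r + 1 - (l+1))) := by
        rw [List.drop_eq_getElem_cons hlen]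
        rw [show r + 1 - l = (r + 1 - (l+1)) + 1 from by omega]
        rw [List.take_succ_cons]
      rw [hseg, pvSpec_cons_notalpha h1', pvTakeSucc _ _ hlen]
      simp only [List.append_assoc, List.cons_append, List.nil_append]
  · -- l ≥ r : loop exits
    rw [pvTwoPointer, dif_neg hlr]
    rcases Nat.lt_or_ge r l with hlt | hge
    · have : l = r + 1 := by omega
      subst this
      simp [pvSpec, pvFill]
    · have : l = r := by omega
      subst this
      have hseg : (chars.drop l).take 1 = [chars[l]] := by
        rw [List.drop_eq_getElem_cons hr, List.take_succ_cons, List.take_zero]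
      rw [show l + 1 - l = 1 from by omega, hseg, pvSpec_singleton,
        List.append_assoc, List.singleton_append, ← List.drop_eq_getElem_cons hr,
        List.take_append_drop]
termination_by r - l
decreasing_by all_goals omega

theorem pvTwoPointer_word (cs : List Char) :
    pvTwoPointer cs 0 (cs.length - 1) = pvSpec cs := by
  rcases cs with _ | ⟨c, cs'⟩
  · rw [pvTwoPointer]; simp [pvSpec, pvFill]
  · have h := pvTwoPointer_spec (c :: cs') 0 ((c :: cs').length - 1)
      (by omega) (by simp)
    rw [h]
    simp

-- ===== A-side characterisation: the rewrite loop computes pvFill with the mirror list =====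
theorem pvALoop_spec (m : List Char) (w : List Char) (k ci : Nat) (hk : k ≤ w.length)
    (n : Nat) (hn : n = w.length) :
    ((PySem.List.pyRange (k : Int) (n : Int)).foldl
      (fun (st : List Char × Nat) index_of_symbol =>
          match PySem.List.pyGet? st.1 index_of_symbol with
          | some c =>
              if PySem.Chars.isalpha c then
                (st.1.set index_of_symbol.toNat ((PySem.List.pyGet? m (st.2 : Int)).getD c),
                 st.2 + 1)
              else st
          | none => st)
      (w, ci)).1
    = w.take k ++ pvFill (w.drop k) (m.drop ci) := by
  subst hn
  by_cases hkn : k < w.length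
  · rw [PySem.List.pyRange_one_cons (by exact_mod_cast hkn), List.foldl_cons]
    have hget : PySem.List.pyGet? w (k : Int) = some w[k] := by
      rw [PySem.List.pyGet?_natCast, List.getElem?_eq_getElem hkn]
    simp only [hget]
    by_cases hc : PySem.Chars.isalpha w[k]
    · simp only [hc, if_pos]
      set x := (PySem.List.pyGet? m (ci : Int)).getD w[k] with hx
      set w' := w.set (k : Int).toNat x with hw'
      have hlen' : w'.length = w.length := by simp [hw']
      rw [show (k : Int) + 1 = ((k+1 : Nat) : Int) from by push_cast; ring]
      have ih := pvALoop_spec m w' (k+1) (ci+1) (by rw [hlen']; omega) w.length hlen'.symm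
      rw [ih]
      have htake : w'.take (k+1) = w.take k ++ [x] := by
        rw [hw']
        simp only [Int.toNat_natCast]
        rw [List.take_set]
        rw [pvTakeSucc _ _ hkn]
        rw [List.set_append_right _ _ (by simp [List.length_take]; try omega)]
        simp [List.length_take, Nat.min_eq_left (le_of_lt hkn)]
      have hdrop : w'.drop (k+1) = w.drop (k+1) := by
        rw [hw']
        simp only [Int.toNat_natCast]
        rw [List.drop_set, if_pos (by omega)]
      rw [htake, hdrop]
      have hfill : pvFill (w.drop k) (m.drop ci)
          = x :: pvFill (w.drop (k+1)) (m.drop (ci+1)) := by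
        rw [List.drop_eq_getElem_cons hkn, pvFill_alpha hc]
        congr 1
        · rw [hx, PySem.List.pyGet?_natCast, List.headD_eq_head?_getD, List.head?_drop]
        · rw [List.tail_drop]
      rw [hfill]
      simp only [List.append_assoc, List.cons_append, List.nil_append]
    · have hc' : PySem.Chars.isalpha w[k] = false := by simpa using hc
      simp only [hc', Bool.false_eq_true, if_false]
      rw [show (k : Int) + 1 = ((k+1 : Nat) : Int) from by push_cast; ring]
      have ih := pvALoop_spec m w (k+1) ci (by omega) w.length rfl
      rw [ih]
      have hfill : pvFill (w.drop k) (m.drop ci)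
          = w[k] :: pvFill (w.drop (k+1)) (m.drop ci) := by
        rw [List.drop_eq_getElem_cons hkn, pvFill_notalpha hc']
      rw [pvTakeSucc _ _ hkn, hfill]
      simp only [List.append_assoc, List.cons_append, List.nil_append]
  · have hle : w.length ≤ k := by omega
    rw [PySem.List.pyRange_one_eq_nil (by exact_mod_cast hle)]
    simp [List.take_of_length_le hle, List.drop_eq_nil_of_le hle, pvFill]
termination_by w.length - k
decreasing_by all_goals first
  | omega
  | (simp only [List.length_set]; omega)

-- per-word agreement of the two ports' inner computations
theorem pvWord_eq (w : List Char) :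
    ((PySem.List.pyRange 0 (w.length : Int)).foldl
      (fun (st : List Char × Nat) index_of_symbol =>
          match PySem.List.pyGet? st.1 index_of_symbol with
          | some c =>
              if PySem.Chars.isalpha c then
                (st.1.set index_of_symbol.toNat
                  ((PySem.List.pyGet? (((PySem.List.slice? w none none (-1)).getD []).filter PySem.Chars.isalpha) (st.2 : Int)).getD c),
                 st.2 + 1)
              else st
          | none => st)
      (w, 0)).1
    = pvTwoPointer w 0 (w.length - 1) := by
  rw [pvTwoPointer_word]
  rw [show (0 : Int) = ((0 : Nat) : Int) from rfl]
  rw [pvALoop_spec _ w 0 0 (by omega) w.length rfl]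
  rw [PySem.List.slice?_none_none_neg_one]
  simp [pvSpec, List.filter_reverse]

-- ===== VERDICT (by name: the statement is the Claim_ definition above) =====
theorem make_anagrams_spec : Claim_equal_make_anagrams := by
  intro t _
  unfold Spec_make_anagrams make_anagrams make_anagrams_alt
  by_cases h : t = " "
  · simp [h]
  · simp only [h, ne_eq, not_false_eq_true, if_true, beq_iff_eq]
    congr 1
    apply PySem.List.foldl_congr_mem
    intro acc w _
    rw [pvWord_eq]
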